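-- pv_equiv track=rewrite | github.com/gabriellaec/desoft-analise-exercicios | backup/user_097/ch71_2019_10_01_02_48_44_824227.py | esconde_senha
-- ===== SOURCE A (Python) =====
-- def esconde_senha(senha):
--     senha_escondida = []
--     i = 0
--     while (i < len(senha)):
--         senha_escondida.append("*")
--         i = i + 1
--     senha_escondida = "".join(senha_escondida)
--     return senha_escondida
-- ===== SOURCE B (Python) =====
-- def esconde_senha(senha):
--     return "*" * len(senha)
-- ===== Notes on version B (the rewrite author's own statement) =====
-- stated objective: idiomatic
-- what changed: Replaced the while-loop that appends an asterisk per character to a list and joins it with the closed-form string repetition of the asterisk by len(senha).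
import Mathlib
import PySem

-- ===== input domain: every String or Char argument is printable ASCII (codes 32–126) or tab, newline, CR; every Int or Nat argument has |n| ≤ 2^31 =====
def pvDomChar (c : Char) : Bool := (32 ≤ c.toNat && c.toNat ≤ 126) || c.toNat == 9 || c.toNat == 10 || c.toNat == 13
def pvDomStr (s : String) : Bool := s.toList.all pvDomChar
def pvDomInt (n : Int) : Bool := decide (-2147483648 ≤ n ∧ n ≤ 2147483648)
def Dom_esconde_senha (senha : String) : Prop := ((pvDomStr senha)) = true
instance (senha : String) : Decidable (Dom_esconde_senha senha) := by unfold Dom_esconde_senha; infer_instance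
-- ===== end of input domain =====

-- B replaces A's while-loop-append-join with closed-form string repetition of the asterisk by the password length (idiomatic one-liner).

-- ===== PORT A =====
-- A's while loop (append one asterisk per iteration), as structural recursion on the remaining iteration count
def escondeLoop : Nat → List String → List String
  | 0, acc => acc
  | n + 1, acc => escondeLoop n (acc ++ ["*"])

def esconde_senha (senha : String) : String :=
  PySem.Str.join "" (escondeLoop senha.toList.length [])

-- ===== PORT B =====
def esconde_senha_alt (senha : String) : String :=
  String.ofList (PySem.List.pyRepeat ['*'] (PySem.Str.len senha))

-- ===== PRECONDITION & SPEC =====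
def Spec_esconde_senha (senha : String) (out : String) : Prop := out = esconde_senha_alt senha
instance (senha : String) (out : String) : Decidable (Spec_esconde_senha senha out) := by unfold Spec_esconde_senha; infer_instance

-- ===== CLAIM (what is proved, stated in full; the proofs are below) =====
def Claim_equal_esconde_senha : Prop := ∀ (senha : String), Dom_esconde_senha senha → Spec_esconde_senha senha (esconde_senha senha)

-- ===== LEMMAS AND PROOFS =====
theorem escondeLoop_eq (n : Nat) (acc : List String) :
    escondeLoop n acc = acc ++ List.replicate n "*" := by
  induction n generalizing acc with
  | zero => simp [escondeLoop]
  | succ k ih => simp [escondeLoop, ih, List.replicate_succ]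

theorem replicate_star_map (n : Nat) :
    List.map String.toList (List.replicate n "*") = List.map (fun c => [c]) (List.replicate n '*') := by
  simp

-- ===== VERDICT (by name: the statement is the Claim_ definition above) =====
theorem esconde_senha_spec : Claim_equal_esconde_senha := by
  intro senha _
  unfold Spec_esconde_senha esconde_senha esconde_senha_alt
  rw [escondeLoop_eq]
  have h : (PySem.Str.join "" (([] : List String) ++ List.replicate senha.toList.length "*")).toList
      = List.replicate senha.toList.length '*' := by
    rw [PySem.Str.toList_join]
    simp only [List.nil_append, replicate_star_map]
    exact PySem.Chars.join_nil_singletons _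
  have hlen : (PySem.Str.len senha).toNat = senha.toList.length := by
    simp [PySem.Str.len_eq]
  rw [PySem.List.pyRepeat_singleton, hlen, ← h]
  exact String.ofList_toList.symm
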